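-- pv_equiv track=rewrite | github.com/themorlan/openREM | openrem/remapp/exports/ct_export.py | _generate_all_data_headers_ct
-- ===== SOURCE A (Python) =====
-- def _generate_all_data_headers_ct(max_events):
--     """Generate the headers for CT that repeat once for each series of the exam with the most series in
--
--     :param max_events: maximum number of times to repeat headers
--     :return: list of headers
--     """
--
--     repeating_series_headers = []
--     for h in range(int(max_events)):
--         repeating_series_headers += [
--             "E" + str(h + 1) + " Protocol",
--             "E" + str(h + 1) + " Type",
--             "E" + str(h + 1) + " Exposure time",
--             "E" + str(h + 1) + " Scanning length",
--             "E" + str(h + 1) + " Slice thickness",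
--             "E" + str(h + 1) + " Total collimation",
--             "E" + str(h + 1) + " Pitch",
--             "E" + str(h + 1) + " No. sources",
--             "E" + str(h + 1) + " CTDIvol",
--             "E" + str(h + 1) + " Phantom",
--             "E" + str(h + 1) + " DLP",
--             "E" + str(h + 1) + " S1 name",
--             "E" + str(h + 1) + " S1 kVp",
--             "E" + str(h + 1) + " S1 max mA",
--             "E" + str(h + 1) + " S1 mA",
--             "E" + str(h + 1) + " S1 Exposure time/rotation",
--             "E" + str(h + 1) + " S2 name",
--             "E" + str(h + 1) + " S2 kVp",
--             "E" + str(h + 1) + " S2 max mA",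
--             "E" + str(h + 1) + " S2 mA",
--             "E" + str(h + 1) + " S2 Exposure time/rotation",
--             "E" + str(h + 1) + " mA Modulation type",
--             "E" + str(h + 1) + " Dose check details",
--             "E" + str(h + 1) + " Comments",
--         ]
--
--     return repeating_series_headers
-- ===== SOURCE B (Python) =====
-- _CT_SERIES_FIELDS = [
--     "Protocol", "Type", "Exposure time", "Scanning length", "Slice thickness",
--     "Total collimation", "Pitch", "No. sources", "CTDIvol", "Phantom", "DLP",
--     "S1 name", "S1 kVp", "S1 max mA", "S1 mA", "S1 Exposure time/rotation",
--     "S2 name", "S2 kVp", "S2 max mA", "S2 mA", "S2 Exposure time/rotation",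
--     "mA Modulation type", "Dose check details", "Comments",
-- ]
--
--
-- def _generate_all_data_headers_ct(max_events):
--     # One flat pass over all header positions: position i belongs to event
--     # i // n (0-based) and field i % n.  No per-event block building.
--     n = len(_CT_SERIES_FIELDS)
--     return [
--         "E" + str(i // n + 1) + " " + _CT_SERIES_FIELDS[i % n]
--         for i in range(n * int(max_events))
--     ]
-- ===== Notes on version B (the rewrite author's own statement) =====
-- stated objective: alternative
-- what changed: Instead of looping over events and appending an unrolled block of per-field literal concatenations per event, B computes each header position directly in one flat pass over all positions using divmod index arithmetic (event = position // n_fields, field = position % n_fields) against a field-name table.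
import Mathlib
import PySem

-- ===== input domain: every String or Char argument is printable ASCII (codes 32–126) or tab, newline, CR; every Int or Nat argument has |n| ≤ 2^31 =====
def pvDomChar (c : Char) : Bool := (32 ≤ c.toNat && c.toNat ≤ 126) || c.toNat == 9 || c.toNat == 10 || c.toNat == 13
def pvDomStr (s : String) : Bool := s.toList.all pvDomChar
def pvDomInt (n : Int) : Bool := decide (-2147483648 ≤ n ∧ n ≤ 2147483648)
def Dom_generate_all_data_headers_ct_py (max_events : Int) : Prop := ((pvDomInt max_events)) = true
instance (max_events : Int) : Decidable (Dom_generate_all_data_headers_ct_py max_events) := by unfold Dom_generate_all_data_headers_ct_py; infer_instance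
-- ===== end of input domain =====

-- B replaces A's per-event append of a 24-literal block by one flat pass over all
-- header positions with divmod index arithmetic into a field-name table (alternative).

-- ===== PORT A =====
-- literal transliteration: loop over range(int(max_events)), '+=' a 24-literal block each iteration
def generate_all_data_headers_ct_py (max_events : Int) : List String :=
  (PySem.List.pyRange 0 max_events 1).foldl
    (fun repeating_series_headers h =>
      repeating_series_headers ++ [
        "E" ++ PySem.Int.toStr (h + 1) ++ " Protocol",
        "E" ++ PySem.Int.toStr (h + 1) ++ " Type",
        "E" ++ PySem.Int.toStr (h + 1) ++ " Exposure time",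
        "E" ++ PySem.Int.toStr (h + 1) ++ " Scanning length",
        "E" ++ PySem.Int.toStr (h + 1) ++ " Slice thickness",
        "E" ++ PySem.Int.toStr (h + 1) ++ " Total collimation",
        "E" ++ PySem.Int.toStr (h + 1) ++ " Pitch",
        "E" ++ PySem.Int.toStr (h + 1) ++ " No. sources",
        "E" ++ PySem.Int.toStr (h + 1) ++ " CTDIvol",
        "E" ++ PySem.Int.toStr (h + 1) ++ " Phantom",
        "E" ++ PySem.Int.toStr (h + 1) ++ " DLP",
        "E" ++ PySem.Int.toStr (h + 1) ++ " S1 name",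
        "E" ++ PySem.Int.toStr (h + 1) ++ " S1 kVp",
        "E" ++ PySem.Int.toStr (h + 1) ++ " S1 max mA",
        "E" ++ PySem.Int.toStr (h + 1) ++ " S1 mA",
        "E" ++ PySem.Int.toStr (h + 1) ++ " S1 Exposure time/rotation",
        "E" ++ PySem.Int.toStr (h + 1) ++ " S2 name",
        "E" ++ PySem.Int.toStr (h + 1) ++ " S2 kVp",
        "E" ++ PySem.Int.toStr (h + 1) ++ " S2 max mA",
        "E" ++ PySem.Int.toStr (h + 1) ++ " S2 mA",
        "E" ++ PySem.Int.toStr (h + 1) ++ " S2 Exposure time/rotation",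
        "E" ++ PySem.Int.toStr (h + 1) ++ " mA Modulation type",
        "E" ++ PySem.Int.toStr (h + 1) ++ " Dose check details",
        "E" ++ PySem.Int.toStr (h + 1) ++ " Comments"]) []

-- ===== PORT B =====
def pvCtSeriesFields : List String :=
  ["Protocol", "Type", "Exposure time", "Scanning length", "Slice thickness",
   "Total collimation", "Pitch", "No. sources", "CTDIvol", "Phantom", "DLP",
   "S1 name", "S1 kVp", "S1 max mA", "S1 mA", "S1 Exposure time/rotation",
   "S2 name", "S2 kVp", "S2 max mA", "S2 mA", "S2 Exposure time/rotation",
   "mA Modulation type", "Dose check details", "Comments"]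

-- one flat map over all positions; the .getD "" only totalises the index access,
-- which Python never sees fail since 0 <= i % n < n
def generate_all_data_headers_ct_py_alt (max_events : Int) : List String :=
  let n : Int := (pvCtSeriesFields.length : Int)
  (PySem.List.pyRange 0 (n * max_events) 1).map (fun i =>
    "E" ++ PySem.Int.toStr (PySem.Int.floordiv i n + 1) ++ " " ++
      (PySem.List.pyGet? pvCtSeriesFields (PySem.Int.mod i n)).getD "")

-- ===== PRECONDITION & SPEC =====
def Spec_generate_all_data_headers_ct_py (max_events : Int) (out : List String) : Prop := out = generate_all_data_headers_ct_py_alt max_events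
instance (max_events : Int) (out : List String) : Decidable (Spec_generate_all_data_headers_ct_py max_events out) := by unfold Spec_generate_all_data_headers_ct_py; infer_instance

-- ===== CLAIM =====
def Claim_equal_generate_all_data_headers_ct_py : Prop := ∀ (max_events : Int), Dom_generate_all_data_headers_ct_py max_events → Spec_generate_all_data_headers_ct_py max_events (generate_all_data_headers_ct_py max_events)

-- ===== LEMMAS AND PROOFS =====

-- splitting a one-space-prefixed literal: p ++ " X" = p ++ " " ++ "X"
theorem pv_sp (p a b : String) (h : " " ++ a = b) : p ++ b = p ++ " " ++ a := by
  rw [String.append_assoc, h]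

-- the 24-string block A appends for 0-based event k
def pvBlock (k : Nat) : List String :=
  pvCtSeriesFields.map (fun field => "E" ++ PySem.Int.toStr ((k : Int) + 1) ++ " " ++ field)

theorem pv_fd24 (k j : Nat) (hj : j < 24) :
    PySem.Int.floordiv ((24 * k + j : Nat) : Int) 24 = (k : Int) := by
  rw [PySem.Int.floordiv_eq_ediv_of_pos (by norm_num)]
  omega

theorem pv_md24 (k j : Nat) (hj : j < 24) :
    PySem.Int.mod ((24 * k + j : Nat) : Int) 24 = (j : Int) := by
  rw [PySem.Int.mod_eq_emod_of_pos (by norm_num)]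
  omega

theorem pv_inner (k : Nat) :
    (List.range 24).map (fun j =>
      "E" ++ PySem.Int.toStr (PySem.Int.floordiv ((24 * k + j : Nat) : Int) 24 + 1) ++ " " ++
        (PySem.List.pyGet? pvCtSeriesFields (PySem.Int.mod ((24 * k + j : Nat) : Int) 24)).getD "")
      = pvBlock k := by
  have hfd : ∀ j : Nat, j < 24 → ∀ s : String,
      "E" ++ PySem.Int.toStr (PySem.Int.floordiv ((24 * k + j : Nat) : Int) 24 + 1) ++ " " ++ s
        = "E" ++ PySem.Int.toStr ((k : Int) + 1) ++ " " ++ s := by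
    intro j hj s; rw [pv_fd24 k j hj]
  simp only [List.range_succ, List.range_zero, List.map_cons, List.map_nil,
    List.nil_append, List.cons_append]
  rw [hfd 0 (by norm_num), hfd 1 (by norm_num), hfd 2 (by norm_num), hfd 3 (by norm_num),
    hfd 4 (by norm_num), hfd 5 (by norm_num), hfd 6 (by norm_num), hfd 7 (by norm_num),
    hfd 8 (by norm_num), hfd 9 (by norm_num), hfd 10 (by norm_num), hfd 11 (by norm_num),
    hfd 12 (by norm_num), hfd 13 (by norm_num), hfd 14 (by norm_num), hfd 15 (by norm_num),
    hfd 16 (by norm_num), hfd 17 (by norm_num), hfd 18 (by norm_num), hfd 19 (by norm_num),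
    hfd 20 (by norm_num), hfd 21 (by norm_num), hfd 22 (by norm_num), hfd 23 (by norm_num),
    pv_md24 k 0 (by norm_num), pv_md24 k 1 (by norm_num), pv_md24 k 2 (by norm_num),
    pv_md24 k 3 (by norm_num), pv_md24 k 4 (by norm_num), pv_md24 k 5 (by norm_num),
    pv_md24 k 6 (by norm_num), pv_md24 k 7 (by norm_num), pv_md24 k 8 (by norm_num),
    pv_md24 k 9 (by norm_num), pv_md24 k 10 (by norm_num), pv_md24 k 11 (by norm_num),
    pv_md24 k 12 (by norm_num), pv_md24 k 13 (by norm_num), pv_md24 k 14 (by norm_num),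
    pv_md24 k 15 (by norm_num), pv_md24 k 16 (by norm_num), pv_md24 k 17 (by norm_num),
    pv_md24 k 18 (by norm_num), pv_md24 k 19 (by norm_num), pv_md24 k 20 (by norm_num),
    pv_md24 k 21 (by norm_num), pv_md24 k 22 (by norm_num), pv_md24 k 23 (by norm_num)]
  simp [pvBlock, pvCtSeriesFields, PySem.List.pyGet?, PySem.List.pyIdx?]

theorem pv_key (N : Nat) :
    (List.range (24 * N)).map (fun i =>
      "E" ++ PySem.Int.toStr (PySem.Int.floordiv ((i : Nat) : Int) 24 + 1) ++ " " ++
        (PySem.List.pyGet? pvCtSeriesFields (PySem.Int.mod ((i : Nat) : Int) 24)).getD "")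
      = (List.range N).flatMap pvBlock := by
  induction N with
  | zero => simp
  | succ n ih =>
    have h24 : 24 * (n + 1) = 24 * n + 24 := by ring
    rw [h24, List.range_add, List.map_append, ih,
      show List.range (n + 1) = List.range n ++ [n] from List.range_succ,
      List.flatMap_append,
      show List.flatMap pvBlock [n] = pvBlock n by simp,
      List.map_map]
    congr 1
    exact pv_inner n

-- ===== VERDICT =====
theorem generate_all_data_headers_ct_py_spec : Claim_equal_generate_all_data_headers_ct_py := by
  intro m _
  unfold Spec_generate_all_data_headers_ct_py
  unfold generate_all_data_headers_ct_py generate_all_data_headers_ct_py_alt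
  rw [PySem.List.foldl_append_eq_flatMap]
  simp only [List.nil_append]
  have hlen : (pvCtSeriesFields.length : Int) = 24 := by decide
  rw [hlen, PySem.List.pyRange_one, PySem.List.pyRange_one]
  simp only [Int.sub_zero, zero_add, List.flatMap_map, List.map_map, Function.comp_def]
  have htoNat : (24 * m).toNat = 24 * m.toNat := by omega
  rw [htoNat, pv_key m.toNat]
  congr 1
  funext k
  simp only [pvBlock, pvCtSeriesFields, List.map_cons, List.map_nil, List.cons.injEq, and_true]
  and_intros <;> exact pv_sp _ _ _ (by decide)
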